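-- pv_equiv track=rewrite | github.com/wetleaf/OdiaToEnglish | get_text.py | write_text
-- ===== SOURCE A (Python) =====
-- syntactic_categories = ["adjective",
--                         "adverb",
--                         "adposition",
--                         "conjuction",
--                         "coordinating conjunction",
--                         "coordinating connective",
--                         "correlative connective",
--                         "determiner",
--                         "interjection",
--                         "intransitive verb",
--                         "noun",
--                         "preposition",
--                         "pronoun",
--                         "subordinating conjunction",
--                         "subordinating connective",
--                         "transitive verb",
--                         "verb"
-- ]
--
-- def isPrefix(word):
--     word = word.lower()
--     for w in syntactic_categories:
--         for i in range(min(len(w),len(word))):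
--             if w[i] != word[i] :
--                 break
--         else:
--             return True
--     return False
--
-- def write_text(text):
--     updated_text = ""
--
--     last_lang = "eng"
--
--     for idx in range(len(text)):
--         lang = text[idx][1]
--         t = text[idx][0]
--
--         if (last_lang == "ori" and lang=="eng"):
--
--             j = idx
--             l = lang
--             word = ""
--             while (l == "eng"):
--                 word += text[j][0]
--                 word += " "
--                 j += 1
--                 if (j < len(text)):
--                     l = text[j][1]
--                 else:
--                     break
--
--
--             if (isPrefix(word)):
--                 updated_text += t + " "
--
--             else:
--                 updated_text += "\n" + t + " "
--
--             last_lang = "eng"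
--         elif (lang == "ori"):
--             updated_text += t + " "
--
--             last_lang = "ori"
--         else:
--             updated_text += t + " "
--
--             last_lang = "eng"
--     return updated_text
-- ===== SOURCE B (Python) =====
-- from itertools import groupby
--
-- syntactic_categories = ["adjective",
--                         "adverb",
--                         "adposition",
--                         "conjuction",
--                         "coordinating conjunction",
--                         "coordinating connective",
--                         "correlative connective",
--                         "determiner",
--                         "interjection",
--                         "intransitive verb",
--                         "noun",
--                         "preposition",
--                         "pronoun",
--                         "subordinating conjunction",
--                         "subordinating connective",
--                         "transitive verb",
--                         "verb"
-- ]
--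
-- def isPrefix(word):
--     word = word.lower()
--     for w in syntactic_categories:
--         for i in range(min(len(w), len(word))):
--             if w[i] != word[i]:
--                 break
--         else:
--             return True
--     return False
--
-- def write_text(text):
--     parts = []
--     prev = "eng"
--     for lang, grp in groupby(text, key=lambda p: p[1]):
--         toks = [t for t, _ in grp]
--         if prev == "ori" and lang == "eng":
--             word = "".join(tok + " " for tok in toks)
--             if not isPrefix(word):
--                 parts.append("\n")
--         for tok in toks:
--             parts.append(tok + " ")
--         prev = lang
--     return "".join(parts)
-- ===== Notes on version B (the rewrite author's own statement) =====
-- stated objective: simpler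
-- what changed: Replaces the index loop with an inner lookahead while-loop by a single pass over maximal same-language runs (itertools.groupby), building the probe word once per eng-run and deciding the newline for the whole group.
import Mathlib
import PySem

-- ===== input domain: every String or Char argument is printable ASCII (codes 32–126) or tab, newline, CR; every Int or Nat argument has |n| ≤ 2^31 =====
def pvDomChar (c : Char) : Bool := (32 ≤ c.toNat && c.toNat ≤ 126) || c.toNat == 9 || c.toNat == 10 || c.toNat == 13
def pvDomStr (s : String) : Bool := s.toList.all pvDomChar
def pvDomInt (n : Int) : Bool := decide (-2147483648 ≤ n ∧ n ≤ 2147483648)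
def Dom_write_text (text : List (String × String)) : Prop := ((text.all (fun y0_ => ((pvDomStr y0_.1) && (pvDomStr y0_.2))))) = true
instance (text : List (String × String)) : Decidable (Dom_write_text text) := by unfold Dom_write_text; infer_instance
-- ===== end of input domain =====

-- B rewrites A's index loop + inner lookahead while as one pass over maximal same-language runs (groupby): simpler decomposition, same return value.

-- module-level helpers shared by both Pythons (same module constants)
def syntacticCategories : List String :=
  ["adjective", "adverb", "adposition", "conjuction", "coordinating conjunction",
   "coordinating connective", "correlative connective", "determiner", "interjection",
   "intransitive verb", "noun", "preposition", "pronoun", "subordinating conjunction",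
   "subordinating connective", "transitive verb", "verb"]

-- 'for i in range(min(len w, len word)): if w[i] != word[i]: break else: return True'
-- : the chars agree up to the shorter length
def pvPrefCmp : List Char → List Char → Bool
  | _, [] => true
  | [], _ => true
  | a :: ws, b :: bs => if a = b then pvPrefCmp ws bs else false

def isPrefixPV (word : String) : Bool :=
  let w' := (PySem.Str.lower word).toList
  syntacticCategories.any (fun w => pvPrefCmp w.toList w')

-- ===== PORT A =====
-- the inner 'while (l == "eng")' lookahead, on the suffix starting at idx
def pvRunWord : List (String × String) → String
  | [] => ""
  | (t, l) :: rest => if l = "eng" then (t ++ " ") ++ pvRunWord rest else ""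

-- the 'for idx in range(len(text))' loop, carrying (updated_text, last_lang)
def pvALoop : List (String × String) → String → String → String
  | [], acc, _ => acc
  | (t, lang) :: rest, acc, last_lang =>
    if last_lang = "ori" ∧ lang = "eng" then
      let word := pvRunWord ((t, lang) :: rest)
      if isPrefixPV word then pvALoop rest (acc ++ t ++ " ") "eng"
      else pvALoop rest (acc ++ "\n" ++ t ++ " ") "eng"
    else if lang = "ori" then pvALoop rest (acc ++ t ++ " ") "ori"
    else pvALoop rest (acc ++ t ++ " ") "eng"

def write_text (text : List (String × String)) : String := pvALoop text "" "eng"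

-- ===== PORT B =====
-- split off the maximal run of tokens whose language equals `lang`
def pvTakeRun (lang : String) : List (String × String) → List String × List (String × String)
  | [] => ([], [])
  | (t, l) :: rest =>
    if l = lang then
      let p := pvTakeRun lang rest
      (t :: p.1, p.2)
    else ([], (t, l) :: rest)

theorem pvTakeRun_snd_len (lang : String) : ∀ xs : List (String × String),
    (pvTakeRun lang xs).2.length ≤ xs.length := by
  intro xs
  induction xs with
  | nil => simp [pvTakeRun]
  | cons h t ih =>
    obtain ⟨a, b⟩ := h
    simp only [pvTakeRun]
    split
    · exact Nat.le_succ_of_le ih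
    · simp

-- itertools.groupby(text, key = lang): list of (lang, tokens of the run)
def pvGroups : List (String × String) → List (String × List String)
  | [] => []
  | (t, l) :: rest =>
    let p := pvTakeRun l rest
    (l, t :: p.1) :: pvGroups p.2
termination_by xs => xs.length
decreasing_by
  exact Nat.lt_succ_of_le (pvTakeRun_snd_len _ _)

-- ''.join(tok + ' ' for tok in toks)
def pvEmit (toks : List String) : String := String.join (toks.map (fun t => t ++ " "))

-- the 'for lang, grp in groupby(...)' loop, carrying (parts-so-far, prev)
def pvBLoop : List (String × List String) → String → String → String
  | [], acc, _ => acc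
  | (lang, toks) :: gs, acc, prev =>
    if prev = "ori" ∧ lang = "eng" then
      if isPrefixPV (pvEmit toks) then pvBLoop gs (acc ++ pvEmit toks) lang
      else pvBLoop gs (acc ++ "\n" ++ pvEmit toks) lang
    else pvBLoop gs (acc ++ pvEmit toks) lang

def write_text_alt (text : List (String × String)) : String := pvBLoop (pvGroups text) "" "eng"

-- ===== PRECONDITION & SPEC =====
def Spec_write_text (text : List (String × String)) (out : String) : Prop := out = write_text_alt text
instance (text : List (String × String)) (out : String) : Decidable (Spec_write_text text out) := by unfold Spec_write_text; infer_instance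

-- ===== CLAIM (what is proved, stated in full; the proofs are below) =====
def Claim_equal_write_text : Prop := ∀ (text : List (String × String)), Dom_write_text text → Spec_write_text text (write_text text)

-- ===== LEMMAS AND PROOFS =====

-- the language a token of lang l leaves in last_lang
def pvNext (l : String) : String := if l = "ori" then "ori" else "eng"

theorem pvStrFoldl (l : List String) : ∀ a : String,
    List.foldl (fun r s => r ++ s) a l = a ++ List.foldl (fun r s => r ++ s) "" l := by
  induction l with
  | nil => intro a; simp [String.append_empty]
  | cons b t ih =>
    intro a
    simp only [List.foldl]
    rw [ih (a ++ b), ih ("" ++ b), String.empty_append, String.append_assoc]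

theorem pvEmit_nil : pvEmit [] = "" := rfl

theorem pvEmit_cons (t : String) (r : List String) :
    pvEmit (t :: r) = (t ++ " ") ++ pvEmit r := by
  simp only [pvEmit, List.map, String.join, List.foldl]
  rw [pvStrFoldl, String.empty_append]

theorem pvRunWord_eq_emit : ∀ xs : List (String × String),
    pvRunWord xs = pvEmit (pvTakeRun "eng" xs).1 := by
  intro xs
  induction xs with
  | nil => simp [pvRunWord, pvTakeRun, pvEmit_nil]
  | cons h t ih =>
    obtain ⟨a, b⟩ := h
    by_cases hb : b = "eng" <;>
      simp [pvRunWord, pvTakeRun, hb, pvEmit_nil, pvEmit_cons, ih, String.append_assoc]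

-- A processes a whole run of lang l from state pvNext l by appending each token
theorem pvALoop_run (l : String) : ∀ (xs : List (String × String)) (acc : String),
    pvALoop xs acc (pvNext l) =
      pvALoop (pvTakeRun l xs).2 (acc ++ pvEmit (pvTakeRun l xs).1) (pvNext l) := by
  intro xs
  induction xs with
  | nil => intro acc; simp [pvTakeRun, pvEmit_nil, String.append_empty]
  | cons h t ih =>
    obtain ⟨a, b⟩ := h
    intro acc
    by_cases hb : b = l
    · subst hb
      have hstep : pvALoop ((a, b) :: t) acc (pvNext b) = pvALoop t (acc ++ a ++ " ") (pvNext b) := by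
        by_cases hbo : b = "ori"
        · simp [pvALoop, hbo, pvNext]
        · simp [pvALoop, hbo, pvNext]
      rw [hstep, ih]
      simp [pvTakeRun, pvEmit_cons, String.append_assoc]
    · simp [pvTakeRun, hb, pvEmit_nil, String.append_empty]

theorem pvNext_ori (l : String) : (pvNext l = "ori" ↔ l = "ori") := by
  unfold pvNext; split <;> simp_all

theorem pvMain : ∀ (n : Nat) (xs : List (String × String)) (acc last prev : String),
    xs.length ≤ n → (last = "ori" ↔ prev = "ori") →
    pvALoop xs acc last = pvBLoop (pvGroups xs) acc prev := by
  intro n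
  induction n with
  | zero =>
    intro xs acc last prev hn _
    have : xs = [] := List.eq_nil_of_length_eq_zero (Nat.le_zero.mp hn)
    subst this; simp [pvALoop, pvGroups, pvBLoop]
  | succ n ih =>
    intro xs acc last prev hn hiff
    match xs with
    | [] => simp [pvALoop, pvGroups, pvBLoop]
    | (t, l) :: rest =>
      have hrest : rest.length ≤ n := Nat.lt_succ_iff.mp (by simpa using hn)
      have hrem : (pvTakeRun l rest).2.length ≤ n :=
        le_trans (pvTakeRun_snd_len l rest) hrest
      have hg : pvGroups ((t, l) :: rest)
            = (l, t :: (pvTakeRun l rest).1) :: pvGroups (pvTakeRun l rest).2 := by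
        rw [pvGroups]
      rw [hg]
      by_cases hb : last = "ori" ∧ l = "eng"
      · -- boundary: ori → eng
        obtain ⟨hlast, hl⟩ := hb
        have hprev : prev = "ori" := hiff.mp hlast
        subst hl
        have hword : pvRunWord ((t, "eng") :: rest) = pvEmit (t :: (pvTakeRun "eng" rest).1) := by
          simp [pvRunWord, pvEmit_cons, pvRunWord_eq_emit rest]
        have hrun := pvALoop_run "eng"
        have hnext : pvNext "eng" = "eng" := by simp [pvNext]
        rw [show pvALoop ((t, "eng") :: rest) acc last
              = (if isPrefixPV (pvRunWord ((t, "eng") :: rest))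
                 then pvALoop rest (acc ++ t ++ " ") "eng"
                 else pvALoop rest (acc ++ "\n" ++ t ++ " ") "eng") from by
              simp [pvALoop, hlast]]
        rw [show pvBLoop ((("eng" : String), t :: (pvTakeRun "eng" rest).1) :: pvGroups (pvTakeRun "eng" rest).2) acc prev
              = (if isPrefixPV (pvEmit (t :: (pvTakeRun "eng" rest).1))
                 then pvBLoop (pvGroups (pvTakeRun "eng" rest).2) (acc ++ pvEmit (t :: (pvTakeRun "eng" rest).1)) "eng"
                 else pvBLoop (pvGroups (pvTakeRun "eng" rest).2) (acc ++ "\n" ++ pvEmit (t :: (pvTakeRun "eng" rest).1)) "eng") from by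
              simp [pvBLoop, hprev]]
        rw [hword]
        split
        · rw [show pvALoop rest (acc ++ t ++ " ") "eng" = pvALoop rest (acc ++ t ++ " ") (pvNext "eng") from by rw [hnext],
             hrun]
          rw [hnext]
          rw [ih _ _ _ _ hrem Iff.rfl]
          congr 1
          simp [pvEmit_cons, String.append_assoc]
        · rw [show pvALoop rest (acc ++ "\n" ++ t ++ " ") "eng" = pvALoop rest (acc ++ "\n" ++ t ++ " ") (pvNext "eng") from by rw [hnext],
             hrun]
          rw [hnext]
          rw [ih _ _ _ _ hrem Iff.rfl]
          congr 1
          simp [pvEmit_cons, String.append_assoc]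
      · -- no boundary: both sides append the run plainly
        have hbprev : ¬ (prev = "ori" ∧ l = "eng") := by
          intro ⟨h1, h2⟩; exact hb ⟨hiff.mpr h1, h2⟩
        have hstepA : pvALoop ((t, l) :: rest) acc last = pvALoop rest (acc ++ t ++ " ") (pvNext l) := by
          by_cases hl : l = "ori"
          · simp [pvALoop, hl, pvNext]
          · simp [pvALoop, hb, hl, pvNext]
        rw [hstepA, pvALoop_run l rest]
        rw [show pvBLoop ((l, t :: (pvTakeRun l rest).1) :: pvGroups (pvTakeRun l rest).2) acc prev
              = pvBLoop (pvGroups (pvTakeRun l rest).2) (acc ++ pvEmit (t :: (pvTakeRun l rest).1)) l from by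
              simp [pvBLoop, hbprev]]
        rw [ih _ _ _ _ hrem (pvNext_ori l)]
        congr 1
        simp [pvEmit_cons, String.append_assoc]

-- ===== VERDICT (by name: the statement is the Claim_ definition above) =====
theorem write_text_spec : Claim_equal_write_text := by
  intro text _
  unfold Spec_write_text write_text write_text_alt
  exact pvMain text.length text "" "eng" "eng" (le_refl _) (by simp)
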